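-- pv_equiv track=rewrite | github.com/twerkmeister/table-annotator | api/table_annotator/data_normalization/aux_functions.py | result_checker
-- ===== SOURCE A (Python) =====
-- def result_checker(match_list):
--     """
--     The function checks if a matched string from nat_keys is a substring of another
--     match and filters the list respectively.
--     """
--
--     filtered_matches = []
--
--     first_element_list = [item[0] for item in match_list]
--
--     for index, element in enumerate(first_element_list):
--
--         pop_list = first_element_list.copy()
--         pop_list.pop(index)
--
--         if any(element in s for s in pop_list):
--             continue
--         else:
--             filtered_matches.append(match_list[index])
--
--     return filtered_matches
-- ===== SOURCE B (Python) =====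
-- def result_checker(match_list):
--     """
--     Keeps exactly the entries whose first string is not a substring of the first
--     string of any OTHER entry.  Instead of re-scanning all other entries for
--     every index, build once a multiplicity table of the first strings; an entry
--     survives iff its key is unique and is contained in no strictly longer
--     distinct key.
--     """
--     firsts = [item[0] for item in match_list]
--
--     counts = {}
--     for s in firsts:
--         counts[s] = counts.get(s, 0) + 1
--
--     distinct = list(counts)
--
--     return [item for item in match_list
--             if counts.get(item[0], 0) == 1
--             and not any(item[0] in s for s in distinct if len(s) > len(item[0]))]
-- ===== Notes on version B (the rewrite author's own statement) =====
-- stated objective: faster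
-- what changed: Replaces A's per-index copy/pop of the key list and scan over all other entries by a multiplicity table built once plus a containment test against the strictly longer distinct keys only; an entry is kept iff its key is unique and contained in no longer distinct key.
import Mathlib
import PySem

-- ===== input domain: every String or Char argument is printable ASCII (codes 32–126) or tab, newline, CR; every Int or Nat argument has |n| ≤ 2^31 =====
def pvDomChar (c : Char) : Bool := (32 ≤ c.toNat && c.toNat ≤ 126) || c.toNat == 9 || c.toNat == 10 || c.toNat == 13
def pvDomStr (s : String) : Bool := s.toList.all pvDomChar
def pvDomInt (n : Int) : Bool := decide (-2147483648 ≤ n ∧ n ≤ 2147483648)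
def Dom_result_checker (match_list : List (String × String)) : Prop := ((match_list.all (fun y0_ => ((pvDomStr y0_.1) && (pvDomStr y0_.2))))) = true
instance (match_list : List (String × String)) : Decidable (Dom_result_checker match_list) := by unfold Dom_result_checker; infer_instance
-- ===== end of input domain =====

-- B replaces A's per-index copy/pop-and-scan-all-others by a multiplicity table built
-- once plus a containment test against the strictly longer distinct keys only.


-- ===== PORT A =====
def result_checker (match_list : List (String × String)) : List (String × String) :=
  let first_element_list := match_list.map (fun item => item.1)
  (PySem.List.enumerate first_element_list).foldl
    (fun filtered_matches ie =>
      let pop_list := ((PySem.List.pop? first_element_list ie.1).map Prod.snd).getD []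
      if pop_list.any (fun s => PySem.Str.isIn ie.2 s) then
        filtered_matches
      else
        filtered_matches ++ ((PySem.List.pyGet? match_list ie.1).map (fun m => [m])).getD [])
    []

-- ===== PORT B =====
def result_checker_alt (match_list : List (String × String)) : List (String × String) :=
  let firsts := match_list.map (fun item => item.1)
  let counts := firsts.foldl (fun d s => d.insert s (d.getD s 0 + 1))
    (PySem.Dict.empty : PySem.Dict String Int)
  let distinct := counts.keys
  match_list.filter (fun item =>
    counts.getD item.1 0 == 1 &&
      !((distinct.filter (fun s => decide (PySem.Str.len item.1 < PySem.Str.len s))).any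
          (fun s => PySem.Str.isIn item.1 s)))

-- ===== PRECONDITION & SPEC =====
def Spec_result_checker (match_list : List (String × String)) (out : List (String × String)) : Prop := out = result_checker_alt match_list
instance (match_list : List (String × String)) (out : List (String × String)) : Decidable (Spec_result_checker match_list out) := by unfold Spec_result_checker; infer_instance

-- ===== CLAIM (what is proved, stated in full; the proofs are below) =====
def Claim_equal_result_checker : Prop := ∀ (match_list : List (String × String)), Dom_result_checker match_list → Spec_result_checker match_list (result_checker match_list)

-- ===== LEMMAS AND PROOFS =====

-- An entry with key x is DROPPED iff x occurs twice among the keys or is an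
-- infix of a strictly longer key.
def dropB (x : String) (firsts : List String) : Bool :=
  decide (2 ≤ firsts.count x) ||
    firsts.any (fun s => decide (x.toList.length < s.toList.length) && PySem.Chars.isIn x.toList s.toList)

theorem dropB_iff (x : String) (firsts : List String) :
    dropB x firsts = true ↔ 2 ≤ firsts.count x ∨
      ∃ s ∈ firsts, x.toList.length < s.toList.length ∧ x.toList <:+: s.toList := by
  simp [dropB, List.any_eq_true, PySem.Chars.isIn_iff_infix]

-- A's per-index test over the popped list equals dropB.
theorem any_eraseIdx_eq_dropB (firsts : List String) (n : Nat) (hn : n < firsts.length)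
    (x : String) (hx : firsts[n] = x) :
    ((firsts.eraseIdx n).any (fun s => PySem.Str.isIn x s)) = dropB x firsts := by
  rw [Bool.eq_iff_iff, dropB_iff]
  simp only [List.any_eq_true, PySem.Str.isIn_eq, PySem.Chars.isIn_iff_infix]
  have hsplit : firsts = firsts.take n ++ x :: firsts.drop (n + 1) := by
    conv_lhs => rw [← List.take_append_drop n firsts]
    rw [← hx, List.getElem_cons_drop]
  constructor
  · rintro ⟨s, hs, hinf⟩
    rw [List.eraseIdx_eq_take_drop_succ] at hs
    have hsmem : s ∈ firsts := by
      rcases List.mem_append.mp hs with h | h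
      · exact (List.take_sublist n firsts).mem h
      · exact (List.drop_sublist (n + 1) firsts).mem h
    rcases lt_or_eq_of_le hinf.length_le with hlt | heq
    · exact Or.inr ⟨s, hsmem, hlt, hinf⟩
    · have hxs : x = s := String.toList_inj.mp (hinf.eq_of_length heq)
      left
      have hmem2 : x ∈ firsts.take n ++ firsts.drop (n + 1) := hxs ▸ hs
      have hcc : firsts.count x =
          (firsts.take n).count x + 1 + (firsts.drop (n + 1)).count x := by
        conv_lhs => rw [hsplit]
        rw [List.count_append, List.count_cons_self]
        ring
      rcases List.mem_append.mp hmem2 with h | h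
      · have := List.count_pos_iff.mpr h; omega
      · have := List.count_pos_iff.mpr h; omega
  · rintro (hcnt | ⟨s, hsmem, hlt, hinf⟩)
    · have hcc : firsts.count x =
          (firsts.take n).count x + 1 + (firsts.drop (n + 1)).count x := by
        conv_lhs => rw [hsplit]
        rw [List.count_append, List.count_cons_self]
        ring
      have hx2 : x ∈ firsts.take n ++ firsts.drop (n + 1) := by
        rcases Nat.lt_or_ge 0 ((firsts.take n).count x) with h | h
        · exact List.mem_append.mpr (Or.inl (List.count_pos_iff.mp h))
        · have : 0 < (firsts.drop (n + 1)).count x := by omega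
          exact List.mem_append.mpr (Or.inr (List.count_pos_iff.mp this))
      exact ⟨x, by rw [List.eraseIdx_eq_take_drop_succ]; exact hx2, List.infix_refl _⟩
    · have hne : s ≠ x := by
        intro h; rw [h] at hlt; omega
      have hserase : s ∈ firsts.eraseIdx n := by
        rw [List.eraseIdx_eq_take_drop_succ]
        have := hsplit ▸ hsmem
        rcases List.mem_append.mp this with h | h
        · exact List.mem_append.mpr (Or.inl h)
        · rcases List.mem_cons.mp h with h | h
          · exact absurd h hne
          · exact List.mem_append.mpr (Or.inr h)
      exact ⟨s, hserase, hinf⟩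

-- B as a filter by dropB
theorem B_eq_filter (ml : List (String × String)) :
    result_checker_alt ml = ml.filter (fun it => !dropB it.1 (ml.map (fun item => item.1))) := by
  unfold result_checker_alt
  apply List.filter_congr
  intro it hit
  have hmem : it.1 ∈ ml.map (fun item => item.1) := List.mem_map.mpr ⟨it, hit, rfl⟩
  have hcnt1 : 0 < (ml.map (fun item => item.1)).count it.1 := List.count_pos_iff.mpr hmem
  have hgetD : (PySem.Dict.empty : PySem.Dict String Int).getD it.1 0 = 0 := by
    simp [pysem]
  have hkeys : ((ml.map (fun item => item.1)).foldl
      (fun d s => d.insert s (d.getD s 0 + 1))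
      (PySem.Dict.empty : PySem.Dict String Int)).keys
      = PySem.Set.ofList (ml.map (fun item => item.1)) := by
    rw [PySem.Dict.keys_foldl_insert]; rfl
  rw [Bool.eq_iff_iff, PySem.Dict.getD_foldl_insert_add_one, hgetD, hkeys]
  simp only [Bool.and_eq_true, beq_iff_eq, Bool.not_eq_true', Bool.eq_false_iff, Ne,
    dropB_iff, List.any_eq_true, List.mem_filter, PySem.Str.isIn_eq,
    PySem.Chars.isIn_iff_infix, PySem.Set.mem_ofList, PySem.Str.len_eq,
    decide_eq_true_eq, Nat.cast_lt]
  constructor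
  · rintro ⟨h1, h2⟩ h
    rcases h with hc | ⟨s, hs, hl, hi⟩
    · omega
    · exact h2 ⟨s, ⟨hs, hl⟩, hi⟩
  · intro h
    obtain ⟨hA, hB⟩ := not_or.mp h
    refine ⟨by omega, ?_⟩
    rintro ⟨s, ⟨hs, hl⟩, hi⟩
    exact hB ⟨s, hs, hl, hi⟩

-- A as the same filter, by one generalized induction over the tail
theorem A_gen (ml : List (String × String)) (tl : List (String × String)) :
    ∀ (k : Nat) (acc : List (String × String)), tl = ml.drop k →
    (PySem.List.enumerate ((ml.map (fun item => item.1)).drop k) (k : Int)).foldl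
      (fun filtered_matches ie =>
        let pop_list := ((PySem.List.pop? (ml.map (fun item => item.1)) ie.1).map Prod.snd).getD []
        if pop_list.any (fun s => PySem.Str.isIn ie.2 s) then
          filtered_matches
        else
          filtered_matches ++ ((PySem.List.pyGet? ml ie.1).map (fun m => [m])).getD []) acc
    = acc ++ tl.filter (fun it => !dropB it.1 (ml.map (fun item => item.1))) := by
  induction tl with
  | nil =>
    intro k acc htl
    rw [← List.map_drop, ← htl]
    simp
  | cons hd tl ih =>
    intro k acc htl
    have hk : k < ml.length := by
      by_contra h
      rw [List.drop_eq_nil_of_le (by omega)] at htl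
      exact absurd htl (by simp)
    have hdrop : ml.drop k = ml[k] :: ml.drop (k + 1) := by
      rw [List.getElem_cons_drop]
    have htl' : tl = ml.drop (k + 1) := by
      rw [hdrop] at htl; exact (List.cons.injEq .. ▸ htl).2
    have hkf : k < (ml.map (fun item => item.1)).length := by simpa using hk
    rw [← List.map_drop, htl, hdrop]
    simp only [List.map_cons, PySem.List.enumerate_cons, List.foldl_cons]
    rw [List.map_drop, ← htl']
    have hstep : ((k : Int) + 1) = ((k + 1 : Nat) : Int) := by push_cast; ring
    rw [hstep, ih (k + 1) _ htl']
    rw [PySem.List.pop?_natCast _ k hkf, PySem.List.pyGet?_natCast]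
    simp only [Option.map_some, Option.getD_some, List.getElem?_eq_getElem hk,
      List.getElem_map]
    have hx : (ml.map (fun item => item.1))[k]'hkf = ml[k].1 := List.getElem_map _
    rw [any_eraseIdx_eq_dropB _ k hkf ml[k].1 hx]
    rw [List.filter_cons]
    cases hdb : dropB ml[k].1 (ml.map (fun item => item.1)) <;>
      simp [List.append_assoc]

theorem A_eq_filter (ml : List (String × String)) :
    result_checker ml = ml.filter (fun it => !dropB it.1 (ml.map (fun item => item.1))) := by
  unfold result_checker
  simpa using A_gen ml ml 0 [] rfl

-- ===== VERDICT (by name: the statement is the Claim_ definition above) =====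
theorem result_checker_spec : Claim_equal_result_checker := by
  intro ml _
  unfold Spec_result_checker
  rw [A_eq_filter, B_eq_filter]
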